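-- pv_equiv track=rewrite | github.com/BharathMuppasani/MAPF-IU | utils/reservation_utils.py | find_best_time_to_occupy
-- ===== SOURCE A (Python) =====
-- from typing import List, Tuple, Dict, Set, Optional
--
-- def find_best_time_to_occupy(
--     cell: Tuple[int, int],
--     reservation_table: Dict[int, Dict[Tuple[int, int], Set[int]]],
--     ignore_agent: Optional[int] = None,
--     horizon: int = 50
-- ) -> Tuple[int, int]:
--     """
--     Find time interval when cell is least occupied.
--
--     Returns:
--         (best_start_time, best_duration) - when cell is free longest
--     """
--     best_start = 0
--     best_duration = 0
--     current_start = None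
--     current_duration = 0
--
--     for t in range(horizon):
--         occupied = False
--
--         if t in reservation_table and cell in reservation_table[t]:
--             agents_here = reservation_table[t][cell]
--             if ignore_agent:
--                 agents_here = {a for a in agents_here if a != ignore_agent}
--
--             if agents_here:
--                 occupied = True
--
--         if not occupied:
--             if current_start is None:
--                 current_start = t
--             current_duration += 1
--         else:
--             # End of free period
--             if current_duration > best_duration:
--                 best_duration = current_duration
--                 best_start = current_start if current_start is not None else 0
--             current_start = None
--             current_duration = 0
--
--     # Check final period
--     if current_duration > best_duration:
--         best_duration = current_duration
--         best_start = current_start if current_start is not None else 0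
--
--     return best_start, best_duration
-- ===== SOURCE B (Python) =====
-- def find_best_time_to_occupy(cell, reservation_table, ignore_agent=None, horizon=50):
--     # Collect the occupied time slots from the reservation table itself (sparse),
--     # sort them, and scan the gaps between consecutive occupied slots.
--     occupied_times = []
--     for t, cells in reservation_table.items():
--         if 0 <= t < horizon and cell in cells:
--             agents = cells[cell]
--             if ignore_agent:
--                 agents = agents - {ignore_agent}
--             if agents:
--                 occupied_times.append(t)
--     occupied_times.sort()
--     best_start, best_len, prev = 0, 0, 0
--     for t in occupied_times:
--         if t - prev > best_len:
--             best_start, best_len = prev, t - prev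
--         prev = t + 1
--     if horizon - prev > best_len:
--         best_start, best_len = prev, horizon - prev
--     return best_start, best_len
-- ===== Notes on version B (the rewrite author's own statement) =====
-- stated objective: alternative
-- what changed: Instead of A's clock-driven scan testing occupancy at every t in range(horizon) with a four-variable streak state machine, B iterates over the reservation-table entries to collect the occupied time slots, sorts them, and scans the gaps between consecutive occupied slots (plus the tail up to the horizon) for the earliest longest one.
import Mathlib
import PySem

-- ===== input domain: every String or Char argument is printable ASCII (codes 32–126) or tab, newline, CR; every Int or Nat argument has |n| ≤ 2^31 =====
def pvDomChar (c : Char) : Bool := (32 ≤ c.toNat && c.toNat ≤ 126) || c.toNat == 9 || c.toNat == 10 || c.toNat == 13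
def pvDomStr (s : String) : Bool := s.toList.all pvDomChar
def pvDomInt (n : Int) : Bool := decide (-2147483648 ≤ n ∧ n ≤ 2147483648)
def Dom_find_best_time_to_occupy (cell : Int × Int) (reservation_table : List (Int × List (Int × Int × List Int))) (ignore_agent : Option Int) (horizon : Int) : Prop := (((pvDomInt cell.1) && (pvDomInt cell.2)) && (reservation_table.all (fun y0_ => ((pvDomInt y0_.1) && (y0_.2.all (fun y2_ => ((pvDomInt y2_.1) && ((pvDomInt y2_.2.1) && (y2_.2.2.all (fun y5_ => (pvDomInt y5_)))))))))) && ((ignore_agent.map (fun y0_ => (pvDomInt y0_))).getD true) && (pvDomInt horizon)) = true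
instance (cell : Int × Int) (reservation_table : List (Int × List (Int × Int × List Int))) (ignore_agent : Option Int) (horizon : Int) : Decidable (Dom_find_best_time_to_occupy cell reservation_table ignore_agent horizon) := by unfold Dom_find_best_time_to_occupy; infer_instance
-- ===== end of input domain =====

-- B replaces A's time scan (one occupancy test per t in range(horizon)) by collecting the
-- occupied slots from the reservation-table entries themselves, sorting them, and scanning
-- the gaps between consecutive occupied slots; objective: alternative algorithm, same cost
-- in horizon but driven by the table instead of the clock.

-- ===== PORT A =====
-- first-match lookup in the assoc list representing the outer dict (t -> inner dict)
def pvTblGet? (rt : List (Int × List (Int × Int × List Int))) (t : Int) : Option (List (Int × Int × List Int)) :=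
  match rt with
  | [] => none
  | (k, v) :: rest => if k = t then some v else pvTblGet? rest t

-- first-match lookup of a cell in the inner dict ((x,y) -> agent set)
def pvCellGet? (d : List (Int × Int × List Int)) (cell : Int × Int) : Option (List Int) :=
  match d with
  | [] => none
  | (x, y, ag) :: rest => if (x, y) = cell then some ag else pvCellGet? rest cell

-- A's per-step occupancy test: `t in reservation_table and cell in reservation_table[t]`,
-- then the `if ignore_agent:` truthiness filter (None and 0 are falsy), then set truthiness
def pvOccA (cell : Int × Int) (rt : List (Int × List (Int × Int × List Int))) (ignore_agent : Option Int) (t : Int) : Bool :=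
  match pvTblGet? rt t with
  | none => false
  | some d =>
    match pvCellGet? d cell with
    | none => false
    | some agents =>
      let agents2 := match ignore_agent with
        | none => agents
        | some a => if a ≠ 0 then agents.filter (fun x => x ≠ a) else agents
      agents2 ≠ []

-- A's loop body: state (best_start, best_duration, current_start, current_duration)
def pvAStep (cell : Int × Int) (rt : List (Int × List (Int × Int × List Int))) (ignore_agent : Option Int)
    (st : Int × Int × Option Int × Int) (t : Int) : Int × Int × Option Int × Int :=
  let (bs, bd, cs, cd) := st
  if pvOccA cell rt ignore_agent t then
    if cd > bd then (cs.getD 0, cd, none, 0) else (bs, bd, none, 0)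
  else
    (bs, bd, some (cs.getD t), cd + 1)

-- A's trailing "check final period"
def pvFin (st : Int × Int × Option Int × Int) : Int × Int :=
  if st.2.2.2 > st.2.1 then (st.2.2.1.getD 0, st.2.2.2) else (st.1, st.2.1)

def find_best_time_to_occupy (cell : Int × Int) (reservation_table : List (Int × List (Int × Int × List Int))) (ignore_agent : Option Int) (horizon : Int) : Int × Int :=
  pvFin ((PySem.List.pyRange 0 horizon 1).foldl (pvAStep cell reservation_table ignore_agent) (0, 0, none, 0))

-- ===== PORT B =====
-- B's per-entry test: `0 <= t < horizon and cell in cells`, the `if ignore_agent:` filter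
-- as a set difference, then set truthiness
def pvEntryOcc (cell : Int × Int) (ignore_agent : Option Int) (horizon : Int)
    (e : Int × List (Int × Int × List Int)) : Bool :=
  if 0 ≤ e.1 ∧ e.1 < horizon then
    match pvCellGet? e.2 cell with
    | none => false
    | some agents =>
      let agents2 := match ignore_agent with
        | none => agents
        | some a => if a ≠ 0 then PySem.Set.diff agents [a] else agents
      agents2 ≠ []
  else false

-- B's gap-scan step: state (best_start, best_len, prev), one occupied time t
def pvGapStep (st : Int × Int × Int) (t : Int) : Int × Int × Int :=
  let (bs, bd, prev) := st
  if t - prev > bd then (prev, t - prev, t + 1) else (bs, bd, t + 1)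

-- B's trailing gap up to the horizon
def pvGapFin (horizon : Int) (st : Int × Int × Int) : Int × Int :=
  if horizon - st.2.2 > st.2.1 then (st.2.2, horizon - st.2.2) else (st.1, st.2.1)

def find_best_time_to_occupy_alt (cell : Int × Int) (reservation_table : List (Int × List (Int × Int × List Int))) (ignore_agent : Option Int) (horizon : Int) : Int × Int :=
  let occupied_times := reservation_table.foldl
    (fun acc e => if pvEntryOcc cell ignore_agent horizon e then acc ++ [e.1] else acc) []
  let occT := PySem.List.sorted occupied_times (fun x => x) false
  pvGapFin horizon (occT.foldl pvGapStep (0, 0, 0))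

-- ===== PRECONDITION & SPEC =====
-- Pre_ excludes assoc lists whose outer time keys repeat: such lists represent no Python
-- dict (a dict cannot hold a key twice), and on them A's first-match lookup and B's
-- iteration over all entries read different data.
def Pre_find_best_time_to_occupy (cell : Int × Int) (reservation_table : List (Int × List (Int × Int × List Int))) (ignore_agent : Option Int) (horizon : Int) : Prop :=
  (reservation_table.map Prod.fst).Nodup
instance (cell : Int × Int) (reservation_table : List (Int × List (Int × Int × List Int))) (ignore_agent : Option Int) (horizon : Int) : Decidable (Pre_find_best_time_to_occupy cell reservation_table ignore_agent horizon) := by unfold Pre_find_best_time_to_occupy; infer_instance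

def pvWitness_find_best_time_to_occupy : (Int × Int) × (List (Int × List (Int × Int × List Int))) × Option Int × Int :=
  ((0, 0), [(1, [(0, 0, [1])]), (2, [(0, 0, [2])])], none, 5)

def Spec_find_best_time_to_occupy (cell : Int × Int) (reservation_table : List (Int × List (Int × Int × List Int))) (ignore_agent : Option Int) (horizon : Int) (out : Int × Int) : Prop := out = find_best_time_to_occupy_alt cell reservation_table ignore_agent horizon
instance (cell : Int × Int) (reservation_table : List (Int × List (Int × Int × List Int))) (ignore_agent : Option Int) (horizon : Int) (out : Int × Int) : Decidable (Spec_find_best_time_to_occupy cell reservation_table ignore_agent horizon out) := by unfold Spec_find_best_time_to_occupy; infer_instance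

-- ===== CLAIM =====
def Claim_equal_find_best_time_to_occupy : Prop := ∀ (cell : Int × Int) (reservation_table : List (Int × List (Int × Int × List Int))) (ignore_agent : Option Int) (horizon : Int), Dom_find_best_time_to_occupy cell reservation_table ignore_agent horizon → Pre_find_best_time_to_occupy cell reservation_table ignore_agent horizon → Spec_find_best_time_to_occupy cell reservation_table ignore_agent horizon (find_best_time_to_occupy cell reservation_table ignore_agent horizon)

-- ===== LEMMAS AND PROOFS =====

-- first-match lookup agrees with membership when the keys are distinct
lemma pvTblGet?_of_mem (rt : List (Int × List (Int × Int × List Int))) (t : Int) (d : List (Int × Int × List Int))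
    (hnd : (rt.map Prod.fst).Nodup) (hm : (t, d) ∈ rt) : pvTblGet? rt t = some d := by
  induction rt with
  | nil => cases hm
  | cons e rest ih =>
    obtain ⟨k, v⟩ := e
    simp only [List.map_cons, List.nodup_cons] at hnd
    rcases List.mem_cons.mp hm with h | h
    · cases h; simp [pvTblGet?]
    · have hk : k ≠ t := by
        intro hkt; subst hkt
        exact hnd.1 (List.mem_map.mpr ⟨(k, d), h, rfl⟩)
      simp [pvTblGet?, hk, ih hnd.2 h]

lemma pvTblGet?_mem (rt : List (Int × List (Int × Int × List Int))) (t : Int) (d : List (Int × Int × List Int))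
    (h : pvTblGet? rt t = some d) : (t, d) ∈ rt := by
  induction rt with
  | nil => simp [pvTblGet?] at h
  | cons e rest ih =>
    obtain ⟨k, v⟩ := e
    by_cases hk : k = t
    · subst hk; simp [pvTblGet?] at h; simp [h]
    · simp [pvTblGet?, hk] at h; exact List.mem_cons_of_mem _ (ih h)

-- A's filter and B's set difference leave an empty set of agents at the same time
lemma pvAgents_iff (ia : Option Int) (agents : List Int) :
    ((match ia with
      | none => agents
      | some a => if a ≠ 0 then PySem.Set.diff agents [a] else agents) ≠ [])
    ↔ ((match ia with
      | none => agents
      | some a => if a ≠ 0 then agents.filter (fun x => x ≠ a) else agents) ≠ []) := by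
  cases ia with
  | none => simp
  | some a =>
    by_cases ha : a = 0
    · simp [ha]
    · have hd : ∀ x : Int, x ∈ PySem.Set.diff agents [a] ↔ x ∈ agents ∧ x ≠ a := by
        intro x; simp [pysem]
      simp only [ha, ne_eq, not_false_eq_true, if_true, not_iff_not]
      rw [List.eq_nil_iff_forall_not_mem, List.eq_nil_iff_forall_not_mem]
      constructor
      · intro h x hx
        rcases List.mem_filter.mp hx with ⟨h1, h2⟩
        exact h x ((hd x).mpr ⟨h1, by simpa using h2⟩)
      · intro h x hx
        rcases (hd x).mp hx with ⟨h1, h2⟩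
        exact h x (List.mem_filter.mpr ⟨h1, by simpa using h2⟩)

-- characterisation of A's occupancy test
lemma pvOccA_iff (cell : Int × Int) (rt : List (Int × List (Int × Int × List Int))) (ia : Option Int) (t : Int) :
    pvOccA cell rt ia t = true
      ↔ ∃ d agents, pvTblGet? rt t = some d ∧ pvCellGet? d cell = some agents ∧
          ((match ia with
            | none => agents
            | some a => if a ≠ 0 then agents.filter (fun x => x ≠ a) else agents) ≠ []) := by
  unfold pvOccA
  cases ht : pvTblGet? rt t with
  | none => simp
  | some d =>
    cases hc : pvCellGet? d cell with
    | none => simp [hc]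
    | some agents => simp [hc]

-- characterisation of B's entry test
lemma pvEntryOcc_iff (cell : Int × Int) (ia : Option Int) (horizon : Int) (e : Int × List (Int × Int × List Int)) :
    pvEntryOcc cell ia horizon e = true
      ↔ 0 ≤ e.1 ∧ e.1 < horizon ∧ ∃ agents, pvCellGet? e.2 cell = some agents ∧
          ((match ia with
            | none => agents
            | some a => if a ≠ 0 then PySem.Set.diff agents [a] else agents) ≠ []) := by
  unfold pvEntryOcc
  by_cases hb : 0 ≤ e.1 ∧ e.1 < horizon
  · rw [if_pos hb]
    cases hc : pvCellGet? e.2 cell with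
    | none => simp [hb]
    | some agents => simp [hb]
  · rw [if_neg hb]
    simp only [Bool.false_eq_true, false_iff]
    intro h
    exact hb ⟨h.1, h.2.1⟩

-- membership characterisation of B's occupied_times list
lemma pvMem_occupied (cell : Int × Int) (rt : List (Int × List (Int × Int × List Int))) (ia : Option Int)
    (horizon : Int) (hnd : (rt.map Prod.fst).Nodup) (t : Int) :
    t ∈ (rt.filter (pvEntryOcc cell ia horizon)).map Prod.fst
      ↔ 0 ≤ t ∧ t < horizon ∧ pvOccA cell rt ia t = true := by
  rw [List.mem_map]
  constructor
  · rintro ⟨⟨k, d⟩, he, rfl⟩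
    obtain ⟨hmem, hocc⟩ := List.mem_filter.mp he
    obtain ⟨h0, hh, agents, hc, hne⟩ := (pvEntryOcc_iff cell ia horizon (k, d)).mp hocc
    exact ⟨h0, hh, (pvOccA_iff cell rt ia k).mpr
      ⟨d, agents, pvTblGet?_of_mem rt k d hnd hmem, hc, (pvAgents_iff ia agents).mp hne⟩⟩
  · rintro ⟨h0, hh, hocc⟩
    obtain ⟨d, agents, ht, hc, hne⟩ := (pvOccA_iff cell rt ia t).mp hocc
    exact ⟨(t, d), List.mem_filter.mpr ⟨pvTblGet?_mem rt t d ht,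
      (pvEntryOcc_iff cell ia horizon (t, d)).mpr ⟨h0, hh, agents, hc, (pvAgents_iff ia agents).mpr hne⟩⟩, rfl⟩

-- the sorted occupied-time list IS A's occupancy filter of range(horizon)
lemma pvOccT_eq (cell : Int × Int) (rt : List (Int × List (Int × Int × List Int))) (ia : Option Int)
    (horizon : Int) (hnd : (rt.map Prod.fst).Nodup) :
    PySem.List.sorted ((rt.filter (pvEntryOcc cell ia horizon)).map Prod.fst) (fun x => x) false
      = (PySem.List.pyRange 0 horizon 1).filter (pvOccA cell rt ia) := by
  apply PySem.List.sorted_eq_of_perm_of_pairwise_lt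
  · apply (List.perm_ext_iff_of_nodup ?_ ?_).mpr
    · intro t
      rw [List.mem_filter, PySem.List.mem_pyRange_one, pvMem_occupied cell rt ia horizon hnd t]
      tauto
    · exact (PySem.List.nodup_pyRange_one 0 horizon).filter _
    · exact (rt.filter_sublist.map Prod.fst).nodup hnd
  · exact (PySem.List.pairwise_lt_pyRange_one 0 horizon).filter _

-- core bridge: A's streak machine over range(a, horizon), in its two state shapes
-- (mid-free-run since s, or freshly reset with s = a), equals B's gap scan over the
-- occupied times of that range with prev = s
lemma pvBridge (cell : Int × Int) (rt : List (Int × List (Int × Int × List Int))) (ia : Option Int)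
    (horizon : Int) : ∀ (n : Nat) (a s bs bd : Int), s ≤ a → a ≤ horizon → 0 ≤ bd →
    (horizon - a).toNat = n →
    pvFin ((PySem.List.pyRange a horizon 1).foldl (pvAStep cell rt ia)
            (bs, bd, (if s = a then none else some s), a - s))
      = pvGapFin horizon
          (((PySem.List.pyRange a horizon 1).filter (pvOccA cell rt ia)).foldl pvGapStep (bs, bd, s)) := by
  intro n
  induction n with
  | zero =>
    intro a s bs bd hsa hah hbd h
    have hae : a = horizon := by omega
    subst hae
    rw [PySem.List.pyRange_one_eq_nil (by omega)]
    by_cases hs : s = a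
    · subst hs
      simp [pvFin, pvGapFin, if_neg (show ¬ ((0:Int) > bd) by omega)]
    · simp only [List.filter_nil, List.foldl_nil, pvFin, pvGapFin, if_neg hs]
      by_cases hgt : a - s > bd <;> simp [hgt]
  | succ m ih =>
    intro a s bs bd hsa hah hbd h
    have hlt : a < horizon := by omega
    rw [PySem.List.pyRange_one_cons hlt, List.filter_cons, List.foldl_cons]
    cases hocc : pvOccA cell rt ia a with
    | false =>
      have hstep : pvAStep cell rt ia (bs, bd, (if s = a then none else some s), a - s) a
          = (bs, bd, some s, a + 1 - s) := by
        by_cases hs : s = a <;>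
          simp [pvAStep, hocc, hs] <;> omega
      rw [hstep]
      have := ih (a + 1) s bs bd (by omega) (by omega) hbd (by omega)
      rw [if_neg (show ¬ (s = a + 1) by omega)] at this
      simpa [hocc] using this
    | true =>
      simp only [hocc, if_true]
      rw [List.foldl_cons]
      by_cases hgt : a - s > bd
      · have hs : ¬ (s = a) := by omega
        have hstep : pvAStep cell rt ia (bs, bd, (if s = a then none else some s), a - s) a
            = (s, a - s, none, 0) := by simp [pvAStep, hocc, hs, hgt]
        have hg : pvGapStep (bs, bd, s) a = (s, a - s, a + 1) := by
          simp only [pvGapStep]; rw [if_pos hgt]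
        rw [hstep, hg]
        have := ih (a + 1) (a + 1) s (a - s) (by omega) (by omega) (by omega) (by omega)
        rw [if_pos rfl, show (a + 1 : Int) - (a + 1) = 0 by omega] at this
        exact this
      · have hstep : pvAStep cell rt ia (bs, bd, (if s = a then none else some s), a - s) a
            = (bs, bd, none, 0) := by
          by_cases hs : s = a
          · subst hs; simp [pvAStep, hocc]; omega
          · simp [pvAStep, hocc, hgt]
        have hg : pvGapStep (bs, bd, s) a = (bs, bd, a + 1) := by
          simp only [pvGapStep]; rw [if_neg hgt]
        rw [hstep, hg]
        have := ih (a + 1) (a + 1) bs bd (by omega) (by omega) hbd (by omega)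
        rw [if_pos rfl, show (a + 1 : Int) - (a + 1) = 0 by omega] at this
        exact this

-- ===== VERDICT (by name: the statement is the Claim_ definition above) =====
theorem find_best_time_to_occupy_spec : Claim_equal_find_best_time_to_occupy := by
  intro cell rt ia horizon _ hnd
  unfold Pre_find_best_time_to_occupy at hnd
  unfold Spec_find_best_time_to_occupy find_best_time_to_occupy find_best_time_to_occupy_alt
  rw [PySem.List.foldl_append_if (pvEntryOcc cell ia horizon) Prod.fst]
  simp only [List.nil_append]
  rw [pvOccT_eq cell rt ia horizon hnd]
  by_cases hh : 0 ≤ horizon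
  · have := pvBridge cell rt ia horizon horizon.toNat 0 0 0 0 (by omega) hh (by omega) (by omega)
    rw [if_pos rfl] at this
    simpa using this
  · rw [PySem.List.pyRange_one_eq_nil (by omega)]
    simp only [List.filter_nil, List.foldl_nil]
    simp [pvFin, pvGapFin]
    omega
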